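-- pv_equiv track=rewrite | github.com/nixternal/CodingChallenges | EverybodyCodes/2025-The_Song_of_Ducks_and_Dragons/20.py | part_one
-- ===== SOURCE A (Python) =====
-- def part_one(data: list) -> int:
--     """
--     Count adjacent 'T' pairs in a triangle grid.
--
--     Counts pairs where two 'T' characters are in triangles that share
--     an edge. This includes:
--     - Horizontal pairs within the same row (left-right neighbors)
--     - Diagonal pairs between rows (third edge neighbor)
--
--     Args:
--         data: List of input sections (uses first section)
--
--     Returns:
--         Number of adjacent 'T' pairs found
--     """
--     grid = [line.strip().strip(".") for line in data[0].splitlines()]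
--     pair_count = 0
--
--     # Check horizontal (left-right) pairs within each row
--     for row in grid:
--         for left_char, right_char in zip(row, row[1:]):
--             if left_char == right_char == "T":
--                 pair_count += 1
--
--     # Check diagonal pairs between adjacent rows
--     # Odd columns in row N connect to even columns in row N+1
--     # This represents upward triangles connecting to downward triangles below
--     for current_row, next_row in zip(grid, grid[1:]):
--         for upper_char, lower_char in zip(current_row[1::2], next_row[0::2]):
--             if upper_char == lower_char == "T":
--                 pair_count += 1
--
--     return pair_count
-- ===== SOURCE B (Python) =====
-- def part_one(data: list) -> int:
--     grid = [line.strip().strip(".") for line in data[0].splitlines()]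
--     t_cells = {(r, c)
--                for r, row in enumerate(grid)
--                for c, ch in enumerate(row) if ch == "T"}
--     total = 0
--     for r, c in t_cells:
--         if (r, c + 1) in t_cells:
--             total += 1
--         if c % 2 == 1 and (r + 1, c - 1) in t_cells:
--             total += 1
--     return total
-- ===== Notes on version B (the rewrite author's own statement) =====
-- stated objective: idiomatic
-- what changed: Replaces the two grid-scanning loop nests over zipped rows/slices with a single set of (row,col) coordinates of 'T' cells, iterated once with O(1) membership tests for the right-hand and diagonal neighbour of each anchor cell.
import Mathlib
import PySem

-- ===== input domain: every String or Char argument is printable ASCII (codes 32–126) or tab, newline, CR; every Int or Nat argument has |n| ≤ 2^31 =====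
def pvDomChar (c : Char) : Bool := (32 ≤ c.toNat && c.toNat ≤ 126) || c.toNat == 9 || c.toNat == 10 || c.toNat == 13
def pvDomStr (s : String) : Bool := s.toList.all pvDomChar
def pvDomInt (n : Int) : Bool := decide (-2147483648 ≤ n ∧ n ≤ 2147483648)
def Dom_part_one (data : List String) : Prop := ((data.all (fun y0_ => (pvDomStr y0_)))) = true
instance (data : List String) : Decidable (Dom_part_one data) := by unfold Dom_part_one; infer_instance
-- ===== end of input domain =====

-- B replaces A's two loop nests over zipped rows/slices by one set of 'T' coordinates,
-- iterated once with membership tests for the right and diagonal neighbours (objective: idiomatic).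

-- ===== PORT A =====
def part_one (data : List String) : Int :=
  match PySem.List.pyGet? data 0 with
  | none => 0   -- IndexError in Python: excluded by Pre_part_one
  | some first =>
    let grid := (PySem.Str.splitlines first).map
      (fun line => PySem.Str.stripChars (PySem.Str.strip line) ".")
    let c1 : Int := grid.foldl (fun acc row =>
      (row.toList.zip (PySem.Str.slice row (some 1) none).toList).foldl
        (fun a p => if p.1 = 'T' ∧ p.2 = 'T' then a + 1 else a) acc) 0
    (grid.zip (PySem.List.slice grid (some 1) none)).foldl (fun acc rp =>
      ((((PySem.Str.slice? rp.1 (some 1) none 2).getD "").toList).zip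
        (((PySem.Str.slice? rp.2 none none 2).getD "").toList)).foldl
        (fun a p => if p.1 = 'T' ∧ p.2 = 'T' then a + 1 else a) acc) c1

-- ===== PORT B =====
def part_one_alt (data : List String) : Int :=
  match PySem.List.pyGet? data 0 with
  | none => 0   -- IndexError in Python: excluded by Pre_part_one
  | some first =>
    let grid := (PySem.Str.splitlines first).map
      (fun line => PySem.Str.stripChars (PySem.Str.strip line) ".")
    let tcells : PySem.Set (Int × Int) := PySem.Set.ofList
      ((PySem.List.enumerate grid).flatMap (fun p =>
        (PySem.List.enumerate p.2.toList).filterMap (fun q =>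
          if q.2 = 'T' then some (p.1, q.1) else none)))
    tcells.foldl (fun total p =>
      let total := if PySem.Set.contains tcells (p.1, p.2 + 1) then total + 1 else total
      if PySem.Int.mod p.2 2 = 1 ∧ PySem.Set.contains tcells (p.1 + 1, p.2 - 1) then total + 1
      else total) 0

-- ===== PRECONDITION & SPEC =====
-- Python A raises IndexError on data[0] when data is empty; Pre_ excludes exactly that.
def Pre_part_one (data : List String) : Prop := data ≠ []
instance (data : List String) : Decidable (Pre_part_one data) := by unfold Pre_part_one; infer_instance
def pvWitness_part_one : List String := ["TT.\nT"]
def Spec_part_one (data : List String) (out : Int) : Prop := out = part_one_alt data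
instance (data : List String) (out : Int) : Decidable (Spec_part_one data out) := by unfold Spec_part_one; infer_instance

-- ===== CLAIM (what is proved, stated in full; the proofs are below) =====
def Claim_equal_part_one : Prop := ∀ (data : List String), Dom_part_one data → Pre_part_one data → Spec_part_one data (part_one data)

-- ===== LEMMAS AND PROOFS =====

-- proof-only abbreviations
def rowsOf (grid : List String) (k : Nat) : List Char := (grid.getD k "").toList

def tlist (grid : List String) : List (Int × Int) :=
  (PySem.List.enumerate grid).flatMap (fun p =>
    (PySem.List.enumerate p.2.toList).filterMap (fun q =>
      if q.2 = 'T' then some (p.1, q.1) else none))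

theorem map_getD_range {α : Type} (l : List α) (d : α) :
    (List.range l.length).map (fun k => l.getD k d) = l := by
  apply List.ext_getElem
  · simp
  · intro i h1 h2
    simp [List.getElem?_eq_getElem h2]

theorem zip_tail_eq {α : Type} (l : List α) (d : α) :
    l.zip l.tail = (List.range (l.length - 1)).map (fun c => (l.getD c d, l.getD (c+1) d)) := by
  apply List.ext_getElem
  · simp
  · intro i h1 h2
    have hi : i < l.length - 1 := by simp at h1; omega
    rw [List.getElem_zip]
    simp [List.getElem_tail, List.getElem?_eq_getElem (by omega : i < l.length),
      List.getElem?_eq_getElem (by omega : i + 1 < l.length)]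

theorem zip_map_range {α β : Type} (f : Nat → α) (g : Nat → β) (n m : Nat) :
    ((List.range n).map f).zip ((List.range m).map g)
      = (List.range (min n m)).map (fun k => (f k, g k)) := by
  apply List.ext_getElem
  · simp
  · intro i h1 h2
    rw [List.getElem_zip]
    simp at h1 ⊢

theorem filterMap_if {α β : Type} (l : List α) (p : α → Prop) [DecidablePred p] (h : α → β) :
    l.filterMap (fun x => if p x then some (h x) else none)
      = (l.filter (fun x => decide (p x))).map h := by
  induction l with
  | nil => rfl
  | cons x xs ih =>
    by_cases hx : p x <;> simp [hx, ih]

theorem sum_shrink (n m : Nat) (f g : Nat → Int) (hm : m ≤ n)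
    (h1 : ∀ t, t < m → f t = g t) (h0 : ∀ t, m ≤ t → t < n → f t = 0) :
    ((List.range n).map f).sum = ((List.range m).map g).sum := by
  have hn : n = m + (n - m) := by omega
  rw [hn, List.range_add, List.map_append, List.sum_append, List.map_map]
  have hz : ((List.range (n - m)).map (f ∘ (fun x => m + x))).sum = 0 := by
    apply List.sum_eq_zero
    intro x hx
    simp only [List.mem_map, List.mem_range] at hx
    obtain ⟨y, hy, rfl⟩ := hx
    exact h0 (m + y) (by omega) (by omega)
  rw [hz, add_zero]
  exact congrArg List.sum (List.map_congr_left (fun t ht => h1 t (List.mem_range.mp ht)))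

theorem sum_odd (n : Nat) (f : Nat → Int) :
    ((List.range n).map (fun j => if j % 2 = 1 then f j else 0)).sum
      = ((List.range (n / 2)).map (fun t => f (2*t+1))).sum := by
  induction n with
  | zero => rfl
  | succ n ih =>
    rw [List.range_succ, List.map_append, List.sum_append]
    by_cases hpar : n % 2 = 1
    · have h2 : (n+1)/2 = n/2 + 1 := by omega
      have hn : 2 * (n/2) + 1 = n := by omega
      rw [h2, List.range_succ, List.map_append, List.sum_append, ih]
      simp [hpar, hn]
    · have h2 : (n+1)/2 = n/2 := by omega
      rw [h2, ih]
      simp [hpar]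

theorem slice?_odds {α : Type} (xs : List α) (d : α) :
    PySem.List.slice? xs (some 1) none 2
      = some ((List.range (xs.length / 2)).map (fun k => xs.getD (2*k+1) d)) := by
  unfold PySem.List.slice? PySem.List.sliceIndices
  norm_num
  by_cases hlen : 1 < xs.length
  · simp only [if_pos hlen]
    have hc : (((xs.length : Int) - min 1 (xs.length : Int) + 2 - 1) / 2).toNat = xs.length / 2 := by
      omega
    rw [hc]
    rw [List.filterMap_congr (g := fun x => some (xs.getD (2*x+1) d))
      (fun x hx => by
        have hx' : x < xs.length / 2 := List.mem_range.mp hx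
        have hidx : (min 1 (xs.length:Int) + 2 * (x:Int)).toNat = 2*x+1 := by omega
        rw [hidx, List.getElem?_eq_getElem (by omega)]
        simp [List.getElem?_eq_getElem (show 2*x+1 < xs.length by omega)])]
    exact congrFun List.filterMap_eq_map _
  · simp only [if_neg hlen]
    have : xs.length / 2 = 0 := by omega
    simp [this]
theorem slice?_evens {α : Type} (xs : List α) (d : α) :
    PySem.List.slice? xs none none 2
      = some ((List.range ((xs.length + 1) / 2)).map (fun k => xs.getD (2*k) d)) := by
  unfold PySem.List.slice? PySem.List.sliceIndices
  norm_num
  have hc : (if 0 < xs.length then (((xs.length:Int) + 2 - 1) / 2).toNat else 0) = (xs.length + 1) / 2 := by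
    split <;> omega
  rw [hc]
  rw [List.filterMap_congr (g := fun x => some (xs.getD (2*x) d)) (fun x hx => by
    have hx' : x < (xs.length+1)/2 := List.mem_range.mp hx
    have hidx : ((2 * (x:Int)).toNat) = 2*x := by omega
    rw [hidx, List.getElem?_eq_getElem (by omega)]
    simp [List.getElem?_eq_getElem (show 2*x < xs.length by omega)])]
  exact congrFun List.filterMap_eq_map _

theorem fmod_two_nat (j : Nat) : (PySem.Int.mod (j:Int) 2 = 1) ↔ j % 2 = 1 := by
  simp only [PySem.Int.mod]
  rw [Int.fmod_eq_emod]
  simp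
  omega

theorem tlist_eq (grid : List String) :
    tlist grid = (List.range grid.length).flatMap (fun k =>
      (((List.range (rowsOf grid k).length).filter
          (fun j => decide ((rowsOf grid k).getD j ' ' = 'T'))).map
        (fun (j : Nat) => ((k:Int), (j:Int))))) := by
  unfold tlist
  rw [PySem.List.enumerate_eq_map_pyRange _ "", PySem.List.pyRange_one, List.map_map,
    List.flatMap_map]
  simp only [PySem.List.len_eq, Int.sub_zero, Int.toNat_natCast]
  refine List.flatMap_congr ?_
  intro k hk
  simp only [Function.comp_apply, zero_add, PySem.List.pyGetD_natCast]
  rw [PySem.List.enumerate_eq_map_pyRange _ ' ', PySem.List.pyRange_one]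
  simp only [PySem.List.len_eq, Int.sub_zero, Int.toNat_natCast]
  rw [List.map_map, List.filterMap_map]
  simp only [Function.comp_apply, zero_add, PySem.List.pyGetD_natCast]
  simp only [rowsOf]
  rw [filterMap_if (List.range (grid.getD k "").toList.length)
    (fun j => (grid.getD k "").toList.getD j ' ' = 'T') (fun j => ((k:Int), (j:Int)))]
  rfl

theorem nodup_tlist (grid : List String) : (tlist grid).Nodup := by
  rw [tlist_eq]
  rw [List.nodup_flatMap]
  constructor
  · intro k _
    refine List.Nodup.map ?_ (List.Nodup.filter _ List.nodup_range)
    intro a b hab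
    have := (Prod.mk.injEq _ _ _ _).mp hab
    omega
  · refine List.Pairwise.imp ?_ (List.pairwise_lt_range)
    intro a b hab x hxa hxb
    simp only [List.mem_map] at hxa hxb
    obtain ⟨j1, _, rfl⟩ := hxa
    obtain ⟨j2, _, h2⟩ := hxb
    have : (a:Int) = b := (Prod.mk.injEq _ _ _ _ |>.mp h2.symm).1
    omega

theorem mem_tlist_nat (grid : List String) (k j : Nat) :
    ((k:Int), (j:Int)) ∈ tlist grid
      ↔ (k < grid.length ∧ j < (rowsOf grid k).length ∧ (rowsOf grid k).getD j ' ' = 'T') := by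
  rw [tlist_eq]
  simp only [List.mem_flatMap, List.mem_map, List.mem_range, List.mem_filter, decide_eq_true_eq]
  constructor
  · rintro ⟨a, ha, j', ⟨⟨hj', hT⟩, heq⟩⟩
    obtain ⟨h1, h2⟩ := Prod.mk.injEq _ _ _ _ |>.mp heq
    have hak : a = k := by omega
    have hjj : j' = j := by omega
    subst hak; subst hjj
    exact ⟨ha, hj', hT⟩
  · rintro ⟨hk, hj, hT⟩
    exact ⟨k, hk, j, ⟨⟨hj, hT⟩, rfl⟩⟩

theorem sum_flatMap_map {α β : Type} (l : List α) (g : α → List β) (f : β → Int) :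
    (((l.flatMap g)).map f).sum = (l.map (fun a => ((g a).map f).sum)).sum := by
  induction l with
  | nil => rfl
  | cons x xs ih => simp [List.flatMap_cons, List.sum_append, ih]

theorem sum_filter_eq {α : Type} (l : List α) (q : α → Bool) (h : α → Int) :
    ((l.filter q).map h).sum = (l.map (fun j => if q j then h j else 0)).sum := by
  induction l with
  | nil => rfl
  | cons x xs ih =>
    by_cases hx : q x <;> simp [hx, ih]


def hrow (l : List Char) : Int :=
  ((List.range (l.length - 1)).map
    (fun c => if l.getD c ' ' = 'T' ∧ l.getD (c+1) ' ' = 'T' then (1:Int) else 0)).sum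

def dpair (l1 l2 : List Char) : Int :=
  ((List.range (min (l1.length / 2) ((l2.length + 1) / 2))).map
    (fun t => if l1.getD (2*t+1) ' ' = 'T' ∧ l2.getD (2*t) ' ' = 'T' then (1:Int) else 0)).sum

theorem contains_true {x : Int × Int} {s : List (Int × Int)} :
    (PySem.Set.contains s x = true) ↔ x ∈ s := by
  simp [PySem.Set.contains]

theorem step_congr :
    (fun (a : Int) (p : Char × Char) => if p.1 = 'T' ∧ p.2 = 'T' then a + 1 else a)
      = (fun (a : Int) (p : Char × Char) => a + if p.1 = 'T' ∧ p.2 = 'T' then 1 else 0) := by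
  funext a p
  by_cases h : p.1 = 'T' ∧ p.2 = 'T' <;> simp [h]

theorem hrowA (row : String) (acc : Int) :
    (row.toList.zip (PySem.Str.slice row (some 1) none).toList).foldl
      (fun a p => if p.1 = 'T' ∧ p.2 = 'T' then a + 1 else a) acc
    = acc + hrow row.toList := by
  rw [step_congr, PySem.List.foldl_add]
  congr 1
  rw [PySem.Str.toList_slice]
  have hs : PySem.Chars.slice row.toList (some 1) none = row.toList.tail :=
    PySem.List.slice_from_one row.toList
  rw [hs, zip_tail_eq row.toList ' ', List.map_map]
  rfl

theorem dpairA (r1 r2 : String) (acc : Int) :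
    ((((PySem.Str.slice? r1 (some 1) none 2).getD "").toList).zip
        (((PySem.Str.slice? r2 none none 2).getD "").toList)).foldl
      (fun a p => if p.1 = 'T' ∧ p.2 = 'T' then a + 1 else a) acc
    = acc + dpair r1.toList r2.toList := by
  have h1 : PySem.Str.slice? r1 (some 1) none 2
      = some (String.ofList ((List.range (r1.toList.length / 2)).map
          (fun k => r1.toList.getD (2*k+1) ' '))) := by
    show Option.map String.ofList (PySem.List.slice? r1.toList (some 1) none 2) = _
    rw [slice?_odds r1.toList ' ']
    rfl
  have h2 : PySem.Str.slice? r2 none none 2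
      = some (String.ofList ((List.range ((r2.toList.length + 1) / 2)).map
          (fun k => r2.toList.getD (2*k) ' '))) := by
    show Option.map String.ofList (PySem.List.slice? r2.toList none none 2) = _
    rw [slice?_evens r2.toList ' ']
    rfl
  rw [h1, h2]
  simp only [Option.getD_some, String.toList_ofList]
  rw [zip_map_range, step_congr, PySem.List.foldl_add, add_right_inj, List.map_map]
  rfl

theorem A_eq (grid : List String) :
    (grid.zip (PySem.List.slice grid (some 1) none)).foldl (fun acc rp =>
      ((((PySem.Str.slice? rp.1 (some 1) none 2).getD "").toList).zip
        (((PySem.Str.slice? rp.2 none none 2).getD "").toList)).foldl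
        (fun a p => if p.1 = 'T' ∧ p.2 = 'T' then a + 1 else a) acc)
      (grid.foldl (fun acc row =>
        (row.toList.zip (PySem.Str.slice row (some 1) none).toList).foldl
          (fun a p => if p.1 = 'T' ∧ p.2 = 'T' then a + 1 else a) acc) (0 : Int))
    = (grid.map (fun r => hrow r.toList)).sum
      + ((grid.zip grid.tail).map (fun p => dpair p.1.toList p.2.toList)).sum := by
  rw [PySem.List.slice_from_one]
  have hc1 : (grid.foldl (fun acc row =>
      (row.toList.zip (PySem.Str.slice row (some 1) none).toList).foldl
        (fun a p => if p.1 = 'T' ∧ p.2 = 'T' then a + 1 else a) acc) (0 : Int))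
      = (grid.map (fun r => hrow r.toList)).sum := by
    have : (fun (acc : Int) (row : String) =>
        (row.toList.zip (PySem.Str.slice row (some 1) none).toList).foldl
          (fun a p => if p.1 = 'T' ∧ p.2 = 'T' then a + 1 else a) acc)
        = (fun acc row => acc + hrow row.toList) := by
      funext acc row
      exact hrowA row acc
    rw [this, PySem.List.foldl_add, zero_add]
  rw [hc1]
  have : (fun (acc : Int) (rp : String × String) =>
      ((((PySem.Str.slice? rp.1 (some 1) none 2).getD "").toList).zip
        (((PySem.Str.slice? rp.2 none none 2).getD "").toList)).foldl
        (fun a p => if p.1 = 'T' ∧ p.2 = 'T' then a + 1 else a) acc)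
      = (fun acc rp => acc + dpair rp.1.toList rp.2.toList) := by
    funext acc rp
    exact dpairA rp.1 rp.2 acc
  rw [this, PySem.List.foldl_add]


theorem rowsOf_empty (grid : List String) (k : Nat) (hk : ¬ k < grid.length) :
    rowsOf grid k = [] := by
  unfold rowsOf
  rw [List.getD_eq_default _ _ (by omega)]
  rfl

theorem BH (grid : List String) (k : Nat) :
    ((List.range (rowsOf grid k).length).map (fun j =>
      if (rowsOf grid k).getD j ' ' = 'T' then
        (if ((k:Int), (j:Int) + 1) ∈ tlist grid then (1:Int) else 0) else 0)).sum
    = hrow (rowsOf grid k) := by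
  unfold hrow
  apply sum_shrink _ _ _ _ (by omega)
  · intro t ht
    have hkg : k < grid.length := by
      by_contra hc
      rw [rowsOf_empty grid k hc] at ht
      simp at ht
    have hcast : ((t:Int) + 1) = (((t+1 : Nat)) : Int) := by push_cast; ring
    simp only [hcast, mem_tlist_nat]
    have hb : t + 1 < (rowsOf grid k).length := by omega
    by_cases hA : (rowsOf grid k).getD t ' ' = 'T'
    · by_cases hB : (rowsOf grid k).getD (t+1) ' ' = 'T'
      · rw [if_pos hA, if_pos ⟨hkg, hb, hB⟩, if_pos ⟨hA, hB⟩]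
      · rw [if_pos hA, if_neg (fun h => hB h.2.2), if_neg (fun h => hB h.2)]
    · rw [if_neg hA, if_neg (fun h => hA h.1)]
  · intro t h1 h2
    have hcast : ((t:Int) + 1) = (((t+1 : Nat)) : Int) := by push_cast; ring
    simp only [hcast, mem_tlist_nat]
    have hnb : ¬ (t + 1 < (rowsOf grid k).length) := by omega
    by_cases hA : (rowsOf grid k).getD t ' ' = 'T'
    · rw [if_pos hA, if_neg (fun h => hnb h.2.1)]
    · rw [if_neg hA]

theorem BD (grid : List String) (k : Nat) :
    ((List.range (rowsOf grid k).length).map (fun j =>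
      if (rowsOf grid k).getD j ' ' = 'T' then
        (if (PySem.Int.mod (j:Int) 2 = 1 ∧ ((k:Int) + 1, (j:Int) - 1) ∈ tlist grid)
          then (1:Int) else 0) else 0)).sum
    = if k + 1 < grid.length then dpair (rowsOf grid k) (rowsOf grid (k+1)) else 0 := by
  have hstep1 : ((List.range (rowsOf grid k).length).map (fun j =>
      if (rowsOf grid k).getD j ' ' = 'T' then
        (if (PySem.Int.mod (j:Int) 2 = 1 ∧ ((k:Int) + 1, (j:Int) - 1) ∈ tlist grid)
          then (1:Int) else 0) else 0)).sum
      = ((List.range (rowsOf grid k).length).map (fun j =>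
        if j % 2 = 1 then
          (if ((rowsOf grid k).getD j ' ' = 'T' ∧ k + 1 < grid.length
              ∧ j - 1 < (rowsOf grid (k+1)).length
              ∧ (rowsOf grid (k+1)).getD (j-1) ' ' = 'T') then (1:Int) else 0) else 0)).sum := by
    refine congrArg List.sum (List.map_congr_left ?_)
    intro j hj
    by_cases hm : j % 2 = 1
    · have hj1 : 1 ≤ j := by omega
      have hcast1 : ((j:Int) - 1) = (((j-1 : Nat)) : Int) := by
        have : ((j - 1 : Nat) : Int) = (j : Int) - 1 := by push_cast [hj1]; ring
        omega
      have hcast2 : ((k:Int) + 1) = (((k+1 : Nat)) : Int) := by push_cast; ring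
      simp only [hcast1, hcast2, mem_tlist_nat]
      have hM : PySem.Int.mod (j:Int) 2 = 1 := (fmod_two_nat j).mpr hm
      rw [if_pos hm]
      by_cases hA : (rowsOf grid k).getD j ' ' = 'T'
      · rw [if_pos hA]
        by_cases hKJB : (k+1 < grid.length ∧ j - 1 < (rowsOf grid (k+1)).length
            ∧ (rowsOf grid (k+1)).getD (j-1) ' ' = 'T')
        · rw [if_pos ⟨hM, hKJB⟩, if_pos ⟨hA, hKJB⟩]
        · rw [if_neg (fun h => hKJB h.2), if_neg (fun h => hKJB h.2)]
      · rw [if_neg hA, if_neg (fun h => hA h.1)]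
    · have hmm : ¬ (PySem.Int.mod (j:Int) 2 = 1) := by rw [fmod_two_nat]; exact hm
      have hcond : ¬ (PySem.Int.mod (j:Int) 2 = 1
          ∧ ((k:Int) + 1, (j:Int) - 1) ∈ tlist grid) := fun h => hmm h.1
      rw [if_neg hm, if_neg hcond, ite_self]
  rw [hstep1, sum_odd]
  by_cases hk1 : k + 1 < grid.length
  · rw [if_pos hk1]
    unfold dpair
    apply sum_shrink _ _ _ _ (min_le_left _ _)
    · intro t ht
      have h2t : 2 * t < (rowsOf grid (k+1)).length := by omega
      have h21 : 2 * t + 1 - 1 = 2 * t := by omega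
      rw [h21]
      by_cases hA : (rowsOf grid k).getD (2*t+1) ' ' = 'T'
      · by_cases hB : (rowsOf grid (k+1)).getD (2*t) ' ' = 'T'
        · rw [if_pos ⟨hA, hk1, h2t, hB⟩, if_pos ⟨hA, hB⟩]
        · rw [if_neg (fun h => hB h.2.2.2), if_neg (fun h => hB h.2)]
      · rw [if_neg (fun h => hA h.1), if_neg (fun h => hA h.1)]
    · intro t h1 h2
      have h2t : ¬ (2 * t + 1 - 1 < (rowsOf grid (k+1)).length) := by omega
      rw [if_neg (fun h => h2t h.2.2.1)]
  · rw [if_neg hk1]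
    apply List.sum_eq_zero
    intro x hx
    simp only [List.mem_map] at hx
    obtain ⟨t, _, rfl⟩ := hx
    simp [hk1]

theorem assemble (grid : List String) :
    ((List.range grid.length).map (fun k =>
      hrow (rowsOf grid k)
      + (if k + 1 < grid.length then dpair (rowsOf grid k) (rowsOf grid (k+1)) else 0))).sum
    = (grid.map (fun r => hrow r.toList)).sum
      + ((grid.zip grid.tail).map (fun p => dpair p.1.toList p.2.toList)).sum := by
  rw [List.sum_map_add]
  congr 1
  · conv_rhs => rw [← map_getD_range grid ""]
    rw [List.map_map]
    rfl
  · rw [zip_tail_eq grid "", List.map_map]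
    apply sum_shrink _ _ _ _ (by omega : grid.length - 1 ≤ grid.length)
    · intro t ht
      rw [if_pos (by omega)]
      rfl
    · intro t h1 h2
      rw [if_neg (by omega)]

theorem B_eq (grid : List String) :
    (PySem.Set.ofList (tlist grid)).foldl (fun total p =>
      let total := if PySem.Set.contains (PySem.Set.ofList (tlist grid)) (p.1, p.2 + 1)
        then total + 1 else total
      if PySem.Int.mod p.2 2 = 1 ∧ PySem.Set.contains (PySem.Set.ofList (tlist grid)) (p.1 + 1, p.2 - 1)
        then total + 1 else total) (0 : Int)
    = ((List.range grid.length).map (fun k =>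
        hrow (rowsOf grid k)
        + (if k + 1 < grid.length then dpair (rowsOf grid k) (rowsOf grid (k+1)) else 0))).sum := by
  rw [PySem.Set.ofList_eq_self_of_nodup (tlist grid) (nodup_tlist grid)]
  have hstep : (fun (total : Int) (p : Int × Int) =>
      let total := if PySem.Set.contains (tlist grid) (p.1, p.2 + 1) then total + 1 else total
      if PySem.Int.mod p.2 2 = 1 ∧ PySem.Set.contains (tlist grid) (p.1 + 1, p.2 - 1)
        then total + 1 else total)
      = (fun (total : Int) p => total +
          ((if (p.1, p.2 + 1) ∈ tlist grid then (1:Int) else 0)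
           + (if (PySem.Int.mod p.2 2 = 1 ∧ (p.1 + 1, p.2 - 1) ∈ tlist grid)
              then (1:Int) else 0))) := by
    funext total p
    simp only [contains_true]
    by_cases h1 : (p.1, p.2 + 1) ∈ tlist grid
    · by_cases h2 : PySem.Int.mod p.2 2 = 1 ∧ (p.1 + 1, p.2 - 1) ∈ tlist grid
      · simp only [if_pos h1, if_pos h2]; ring
      · simp only [if_pos h1, if_neg h2]; ring
    · by_cases h2 : PySem.Int.mod p.2 2 = 1 ∧ (p.1 + 1, p.2 - 1) ∈ tlist grid
      · simp only [if_neg h1, if_pos h2]; ring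
      · simp only [if_neg h1, if_neg h2]; ring
  rw [hstep, PySem.List.foldl_add, zero_add]
  have key : ∀ F : Int × Int → Int, ((tlist grid).map F).sum
      = (((List.range grid.length).flatMap (fun k =>
          (((List.range (rowsOf grid k).length).filter
            (fun j => decide ((rowsOf grid k).getD j ' ' = 'T'))).map
            (fun (j : Nat) => ((k:Int), (j:Int)))))).map F).sum := by
    intro F
    rw [← tlist_eq]
  rw [key, sum_flatMap_map]
  refine congrArg List.sum (List.map_congr_left ?_)
  intro k hk
  rw [List.map_map, sum_filter_eq]
  have hsplit : ((List.range (rowsOf grid k).length).map (fun j =>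
      if decide ((rowsOf grid k).getD j ' ' = 'T') then
        ((fun p : Int × Int =>
          (if (p.1, p.2 + 1) ∈ tlist grid then (1:Int) else 0)
          + (if (PySem.Int.mod p.2 2 = 1 ∧ (p.1 + 1, p.2 - 1) ∈ tlist grid)
             then (1:Int) else 0)) ∘ (fun (j : Nat) => ((k:Int), (j:Int)))) j else 0)).sum
      = ((List.range (rowsOf grid k).length).map (fun j =>
          (if (rowsOf grid k).getD j ' ' = 'T' then
            (if ((k:Int), (j:Int) + 1) ∈ tlist grid then (1:Int) else 0) else 0)
          + (if (rowsOf grid k).getD j ' ' = 'T' then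
            (if (PySem.Int.mod (j:Int) 2 = 1 ∧ ((k:Int) + 1, (j:Int) - 1) ∈ tlist grid)
              then (1:Int) else 0) else 0))).sum := by
    refine congrArg List.sum (List.map_congr_left ?_)
    intro j hj
    by_cases hA : (rowsOf grid k).getD j ' ' = 'T'
    · rw [if_pos (decide_eq_true hA), if_pos hA, if_pos hA]
      rfl
    · rw [if_neg (fun h => hA (of_decide_eq_true h)), if_neg hA, if_neg hA]
      simp
  rw [hsplit, List.sum_map_add, BH grid k, BD grid k]

theorem main_eq (grid : List String) :
    (grid.zip (PySem.List.slice grid (some 1) none)).foldl (fun acc rp =>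
      ((((PySem.Str.slice? rp.1 (some 1) none 2).getD "").toList).zip
        (((PySem.Str.slice? rp.2 none none 2).getD "").toList)).foldl
        (fun a p => if p.1 = 'T' ∧ p.2 = 'T' then a + 1 else a) acc)
      (grid.foldl (fun acc row =>
        (row.toList.zip (PySem.Str.slice row (some 1) none).toList).foldl
          (fun a p => if p.1 = 'T' ∧ p.2 = 'T' then a + 1 else a) acc) (0 : Int))
    =
    (PySem.Set.ofList
      ((PySem.List.enumerate grid).flatMap (fun p =>
        (PySem.List.enumerate p.2.toList).filterMap (fun q =>
          if q.2 = 'T' then some (p.1, q.1) else none)))).foldl (fun total p =>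
      let total := if PySem.Set.contains (PySem.Set.ofList
        ((PySem.List.enumerate grid).flatMap (fun p =>
          (PySem.List.enumerate p.2.toList).filterMap (fun q =>
            if q.2 = 'T' then some (p.1, q.1) else none)))) (p.1, p.2 + 1) then total + 1 else total
      if PySem.Int.mod p.2 2 = 1 ∧ PySem.Set.contains (PySem.Set.ofList
        ((PySem.List.enumerate grid).flatMap (fun p =>
          (PySem.List.enumerate p.2.toList).filterMap (fun q =>
            if q.2 = 'T' then some (p.1, q.1) else none)))) (p.1 + 1, p.2 - 1) then total + 1
      else total) (0 : Int) := by
  rw [A_eq, ← assemble]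
  exact (B_eq grid).symm

-- ===== VERDICT (by name: the statement is the Claim_ definition above) =====
theorem part_one_spec : Claim_equal_part_one := by
  intro data _ hpre
  unfold Spec_part_one part_one part_one_alt
  match data, hpre with
  | d :: rest, _ =>
    rw [PySem.List.pyGet?_zero_cons]
    dsimp only
    exact main_eq ((PySem.Str.splitlines d).map
      (fun line => PySem.Str.stripChars (PySem.Str.strip line) "."))
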